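-- pv_equiv track=rewrite | github.com/faiyazkhanwif/ProblemSolving-Python | Problem Solving/Hackerrank/ACMICPC.py | acmTeam
-- ===== SOURCE A (Python) =====
-- from itertools import combinations
--
-- def acmTeam(topic):
--     count = 0
--     max_ = 0
--     for c in combinations(topic, 2):
--         sum_ = bin(int(c[0], 2)|int(c[1], 2)).count('1')
--         if sum_ > max_:
--             count = 1
--             max_ = sum_
--         elif sum_ == max_:
--             count += 1
--     return (max_, count)
-- ===== SOURCE B (Python) =====
-- def acmTeam(topic):
--     sums = []
--     rest = topic
--     while rest:
--         t, rest = rest[0], rest[1:]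
--         sums += [bin(int(t, 2) | int(u, 2)).count("1") for u in rest]
--     if not sums:
--         return (0, 0)
--     m = max(sums)
--     return (m, sums.count(m))
-- ===== Notes on version B (the rewrite author's own statement) =====
-- stated objective: alternative
-- what changed: B materializes the list of per-pair topic counts (a while loop popping the head of the topic list) and then aggregates it with max() and count(), replacing A's single combinations() pass that maintains a running max/count tally.
import Mathlib
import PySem

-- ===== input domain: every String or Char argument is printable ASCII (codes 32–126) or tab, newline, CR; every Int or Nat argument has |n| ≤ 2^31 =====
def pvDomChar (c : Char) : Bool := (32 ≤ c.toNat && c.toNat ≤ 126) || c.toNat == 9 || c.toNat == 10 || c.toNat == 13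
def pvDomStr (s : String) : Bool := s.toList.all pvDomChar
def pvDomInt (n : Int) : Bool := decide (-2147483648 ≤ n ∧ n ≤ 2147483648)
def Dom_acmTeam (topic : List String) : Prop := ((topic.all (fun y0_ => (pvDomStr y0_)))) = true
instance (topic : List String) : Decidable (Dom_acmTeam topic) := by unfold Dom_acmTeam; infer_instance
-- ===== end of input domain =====

-- B replaces A's running max/count tally over combinations() by materializing the list of
-- pair coverages and aggregating it with max()/count(); same cost, different decomposition.
-- ===== PORT A =====
-- int(t, 2) is ported as PySem.Int.ofStrBase? t 2 (exact); .getD 0 is a totality guard only,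
-- Pre_ guarantees every string parses. bin(x).count('1') is PySem.Int.bitCount (exact, also
-- on negatives); '|' is PySem.Int.bor; itertools.combinations is PySem.List.combinations.
def acmTeam (topic : List String) : Int × Int :=
  let st := (PySem.List.combinations topic 2).foldl
    (fun (st : Int × Int) c =>
      let a := (PySem.List.pyGet? c 0).getD ""
      let b := (PySem.List.pyGet? c 1).getD ""
      let sum_ : Int :=
        ((PySem.Int.bitCount (PySem.Int.bor ((PySem.Int.ofStrBase? a 2).getD 0)
            ((PySem.Int.ofStrBase? b 2).getD 0)) : Nat) : Int)
      if sum_ > st.2 then (1, sum_)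
      else if sum_ = st.2 then (st.1 + 1, st.2)
      else st)
    ((0 : Int), (0 : Int))
  (st.2, st.1)

-- ===== PORT B =====
-- B's while loop popping the head of `rest` and extending `sums`:
def pvPairSums : List String → List Int
  | [] => []
  | t :: rest =>
      rest.map (fun u => ((PySem.Int.bitCount (PySem.Int.bor ((PySem.Int.ofStrBase? t 2).getD 0)
        ((PySem.Int.ofStrBase? u 2).getD 0)) : Nat) : Int)) ++ pvPairSums rest

def acmTeam_alt (topic : List String) : Int × Int :=
  let sums := pvPairSums topic
  if sums.isEmpty then (0, 0)
  else
    let m := (PySem.List.max? sums (fun y => y)).getD 0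
    (m, (sums.count m : Int))

-- ===== PRECONDITION & SPEC =====
-- Pre_: exactly the inputs on which A returns without raising: with fewer than two topics
-- nothing is parsed, otherwise every string must be accepted by Python's int(t, 2).
def Pre_acmTeam (topic : List String) : Prop :=
  topic.length < 2 ∨ ∀ s ∈ topic, (PySem.Int.ofStrBase? s 2).isSome = true
instance (topic : List String) : Decidable (Pre_acmTeam topic) := by
  unfold Pre_acmTeam; infer_instance
def pvWitness_acmTeam : List String := ["10", "11", "1"]
def Spec_acmTeam (topic : List String) (out : Int × Int) : Prop := out = acmTeam_alt topic
instance (topic : List String) (out : Int × Int) : Decidable (Spec_acmTeam topic out) := by unfold Spec_acmTeam; infer_instance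

-- ===== CLAIM (what is proved, stated in full; the proofs are below) =====
def Claim_equal_acmTeam : Prop := ∀ (topic : List String), Dom_acmTeam topic → Pre_acmTeam topic → Spec_acmTeam topic (acmTeam topic)

-- ===== LEMMAS AND PROOFS =====

-- A's loop body as a step function on the materialized coverage value.
def pvStep (st : Int × Int) (s : Int) : Int × Int :=
  if s > st.2 then (1, s) else if s = st.2 then (st.1 + 1, st.2) else st

-- the per-pair coverage, as a function of the two mask values
def pvCov (x y : Int) : Int := ((PySem.Int.bitCount (PySem.Int.bor x y) : Nat) : Int)

lemma pvPairSums_eq_combos_map (topic : List String)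
    (mask : String → Int) (hmask : ∀ s, mask s = (PySem.Int.ofStrBase? s 2).getD 0) :
    pvPairSums topic
      = (PySem.List.combinations topic 2).map
          (fun c => pvCov (mask ((PySem.List.pyGet? c 0).getD ""))
                          (mask ((PySem.List.pyGet? c 1).getD ""))) := by
  induction topic with
  | nil => simp [PySem.List.combinations_nil_succ, pvPairSums]
  | cons x xs ih =>
      simp only [pvPairSums, PySem.List.combinations_cons_succ,
        PySem.List.combinations_one, List.map_append, List.map_map, ih]
      simp [Function.comp, PySem.List.pyGet?, PySem.List.pyIdx?, pvCov, hmask]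

lemma pvStep_fold_char (l : List Int) (h : ∀ x ∈ l, 0 ≤ x) :
    l.foldl pvStep (0, 0)
      = (if l = [] then (0 : Int) else (l.count (l.foldl max 0) : Int), l.foldl max 0) := by
  induction l using List.reverseRecOn with
  | nil => simp [pvStep]
  | append_singleton l a ih =>
      have hl : ∀ x ∈ l, 0 ≤ x := fun x hx => h x (by simp [hx])
      have ha : 0 ≤ a := h a (by simp)
      have hM := PySem.List.le_foldl_max l 0
      have hM0 : 0 ≤ l.foldl max 0 := hM.1
      have hMmem : ∀ y ∈ l, y ≤ l.foldl max 0 := hM.2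
      rw [List.foldl_append, List.foldl_append, ih hl]
      cases l with
      | nil =>
          simp only [List.foldl_nil, List.nil_append, if_pos rfl]
          rcases lt_or_eq_of_le ha with hpos | hzero
          · simp [pvStep, hpos, List.count_singleton, max_eq_right (le_of_lt hpos),
              (ne_of_gt hpos)]
          · simp [pvStep, ← hzero]
      | cons b t =>
          set M := (b :: t).foldl max 0 with hMdef
          simp only [if_neg (List.cons_ne_nil b t)]
          rcases lt_trichotomy M a with hlt | heq | hgt
          · have hnot : a ∉ b :: t := fun hmem => absurd (hMmem a hmem) (not_le.mpr hlt)
            have hc : List.count a (b :: (t ++ [a])) = 1 := by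
              have : List.count a (b :: t) = 0 := List.count_eq_zero.mpr hnot
              simp only [List.count_cons, List.count_append, List.count_nil, beq_self_eq_true, if_true] at this ⊢
              omega
            simp [pvStep, hlt, max_eq_right (le_of_lt hlt), (ne_of_gt hlt), hc]
          · have hc : List.count a (b :: (t ++ [a])) = List.count a (b :: t) + 1 := by
              simp only [List.count_cons, List.count_append, List.count_nil, beq_self_eq_true,
                if_true]
              omega
            simp [pvStep, heq, hc]
          · have hne : (a == M) = false := by simp [(ne_of_lt hgt)]
            have hc : List.count M (b :: (t ++ [a])) = List.count M (b :: t) := by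
              simp [List.count_cons, List.count_append, hne]
            simp [pvStep, not_lt.mpr (le_of_lt hgt), (ne_of_lt hgt), hc,
              max_eq_left (le_of_lt hgt)]

lemma pvCov_nonneg (x y : Int) : 0 ≤ pvCov x y := Int.natCast_nonneg _

-- ===== VERDICT (by name: the statement is the Claim_ definition above) =====
theorem acmTeam_spec : Claim_equal_acmTeam := by
  intro topic _ _
  unfold Spec_acmTeam acmTeam acmTeam_alt
  dsimp only
  rw [pvPairSums_eq_combos_map topic (fun t => (PySem.Int.ofStrBase? t 2).getD 0) (fun _ => rfl)]
  set sums := (PySem.List.combinations topic 2).map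
      (fun c => pvCov ((fun t => (PySem.Int.ofStrBase? t 2).getD 0) ((PySem.List.pyGet? c 0).getD ""))
                      ((fun t => (PySem.Int.ofStrBase? t 2).getD 0) ((PySem.List.pyGet? c 1).getD ""))) with hsums
  have hfold : (PySem.List.combinations topic 2).foldl
      (fun (st : Int × Int) c =>
        let a := (PySem.List.pyGet? c 0).getD ""
        let b := (PySem.List.pyGet? c 1).getD ""
        let sum_ : Int :=
          ((PySem.Int.bitCount (PySem.Int.bor ((PySem.Int.ofStrBase? a 2).getD 0)
              ((PySem.Int.ofStrBase? b 2).getD 0)) : Nat) : Int)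
        if sum_ > st.2 then (1, sum_)
        else if sum_ = st.2 then (st.1 + 1, st.2)
        else st)
      ((0 : Int), (0 : Int)) = sums.foldl pvStep (0, 0) := by
    rw [hsums, List.foldl_map]
    rfl
  rw [hfold]
  have hnn : ∀ x ∈ sums, 0 ≤ x := by
    intro x hx
    rw [hsums] at hx
    obtain ⟨c, _, rfl⟩ := List.mem_map.mp hx
    exact pvCov_nonneg _ _
  rw [pvStep_fold_char sums hnn]
  cases hs : sums with
  | nil => simp [hs]
  | cons b t =>
      have hb : 0 ≤ b := hnn b (by simp [hs])
      simp only [hs, List.isEmpty_cons, if_neg (by decide : ¬ (false = true)),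
        PySem.List.max?_id_cons, Option.getD_some, reduceIte, List.cons_ne_nil]
      have : (b :: t).foldl max 0 = t.foldl max b := by
        simp [List.foldl_cons, max_eq_right hb]
      rw [this]
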